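-- pv_equiv track=rewrite | github.com/rtsoliday/medm | tests/testADL_SaveFiles.py | strip_indicator_prec_default
-- ===== SOURCE A (Python) =====
-- def _strip_indicator_limits(block_lines: list[str]) -> list[str]:
--   """Remove precDefault=1 entries inside indicator limits blocks."""
--   result: list[str] = []
--   inside_limits = False
--   limits_depth = 0
--
--   for line in block_lines:
--     stripped = line.strip()
--     if not inside_limits and stripped.startswith("limits"):
--       inside_limits = True
--       limits_depth = line.count("{") - line.count("}")
--       result.append(line)
--       if limits_depth <= 0:
--         inside_limits = False
--       continue
--
--     if inside_limits:
--       if stripped != "precDefault=1":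
--         result.append(line)
--       limits_depth += line.count("{") - line.count("}")
--       if limits_depth <= 0:
--         inside_limits = False
--       continue
--
--     result.append(line)
--
--   return result
--
-- def strip_indicator_prec_default(lines: list[str]) -> list[str]:
--   """Remove default precision lines added within indicator widgets."""
--   result: list[str] = []
--   i = 0
--   while i < len(lines):
--     line = lines[i]
--     stripped = line.strip()
--     if stripped.startswith("indicator"):
--       block: list[str] = []
--       depth = 0
--       while i < len(lines):
--         block_line = lines[i]
--         block.append(block_line)
--         depth += block_line.count("{") - block_line.count("}")
--         i += 1
--         if depth <= 0:
--           break
--       result.extend(_strip_indicator_limits(block))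
--       continue
--
--     result.append(line)
--     i += 1
--
--   return result
-- ===== SOURCE B (Python) =====
-- def strip_indicator_prec_default(lines: list[str]) -> list[str]:
--   """Remove default precision lines added within indicator widgets (single streaming pass)."""
--   out: list[str] = []
--   in_ind = False
--   ind_depth = 0
--   in_lim = False
--   lim_depth = 0
--   for line in lines:
--     stripped = line.strip()
--     braces = line.count("{") - line.count("}")
--     if not in_ind:
--       out.append(line)
--       if stripped.startswith("indicator"):
--         ind_depth = braces
--         in_ind = ind_depth > 0
--         in_lim = False
--         lim_depth = 0
--     else:
--       if not in_lim and stripped.startswith("limits"):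
--         out.append(line)
--         lim_depth = braces
--         in_lim = lim_depth > 0
--       elif in_lim:
--         if stripped != "precDefault=1":
--           out.append(line)
--         lim_depth += braces
--         in_lim = lim_depth > 0
--       else:
--         out.append(line)
--       ind_depth += braces
--       in_ind = ind_depth > 0
--   return out
-- ===== Notes on version B (the rewrite author's own statement) =====
-- stated objective: simpler
-- what changed: Replaces A's two-level structure (outer index loop that materializes each indicator block into a list and rescans it with a helper) by one streaming pass over the lines with explicit indicator/limits depth state and no helper or intermediate block list.
import Mathlib
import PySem

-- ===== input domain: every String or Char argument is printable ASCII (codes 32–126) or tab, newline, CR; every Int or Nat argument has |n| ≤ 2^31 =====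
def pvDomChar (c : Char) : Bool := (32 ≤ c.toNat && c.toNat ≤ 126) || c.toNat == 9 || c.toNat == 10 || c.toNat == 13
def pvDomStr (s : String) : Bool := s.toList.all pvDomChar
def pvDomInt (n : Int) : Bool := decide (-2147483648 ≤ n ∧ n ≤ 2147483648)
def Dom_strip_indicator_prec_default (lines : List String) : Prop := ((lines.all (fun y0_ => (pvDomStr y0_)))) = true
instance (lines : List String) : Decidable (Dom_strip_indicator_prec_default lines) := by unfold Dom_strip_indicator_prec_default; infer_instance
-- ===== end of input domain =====

-- B replaces A's block-materialize-and-rescan decomposition by a single streaming pass with depth counters (objective: simpler; same return value).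

-- ===== PORT A =====

-- line.count("{") - line.count("}")
def pvBraces (line : String) : Int :=
  (PySem.Str.count line "{" : Int) - (PySem.Str.count line "}" : Int)

-- one iteration of the for-loop of _strip_indicator_limits; state = (result, inside_limits, limits_depth);
-- 'inside_limits = True; if depth <= 0: inside_limits = False' is recorded as 'decide (0 < depth)'
def pvStripStep (st : List String × Bool × Int) (line : String) : List String × Bool × Int :=
  let stripped := PySem.Str.strip line
  if (!st.2.1 && PySem.Str.startswith stripped "limits") = true then
    let d := pvBraces line
    (st.1 ++ [line], decide (0 < d), d)
  else if st.2.1 = true then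
    let result' := if stripped ≠ "precDefault=1" then st.1 ++ [line] else st.1
    let d := st.2.2 + pvBraces line
    (result', decide (0 < d), d)
  else
    (st.1 ++ [line], st.2.1, st.2.2)

-- _strip_indicator_limits
def pvStripIndLimits (block : List String) : List String :=
  (block.foldl pvStripStep ([], false, 0)).1

-- the inner 'while i < len(lines)' block-collection loop: returns (block, remaining lines)
def pvTakeBlock : List String → Int → List String × List String
  | [], _ => ([], [])
  | l :: ls, depth =>
    let d := depth + pvBraces l
    if d ≤ 0 then ([l], ls)
    else
      let p := pvTakeBlock ls d
      (l :: p.1, p.2)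

theorem pvTakeBlock_snd_le : ∀ (xs : List String) (d : Int), ((pvTakeBlock xs d).2).length ≤ xs.length := by
  intro xs
  induction xs with
  | nil => intro d; simp [pvTakeBlock]
  | cons l ls ih =>
    intro d
    simp only [pvTakeBlock]
    split
    · simp
    · exact le_trans (ih _) (by simp)

theorem pvTakeBlock_snd_lt (l : String) (ls : List String) (d : Int) :
    ((pvTakeBlock (l :: ls) d).2).length < (l :: ls).length := by
  simp only [pvTakeBlock]
  split
  · simp
  · exact lt_of_le_of_lt (pvTakeBlock_snd_le ls _) (by simp)

-- the outer 'while i < len(lines)' loop of A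
def strip_indicator_prec_default : List String → List String
  | [] => []
  | l :: ls =>
    if PySem.Str.startswith (PySem.Str.strip l) "indicator" = true then
      let p := pvTakeBlock (l :: ls) 0
      pvStripIndLimits p.1 ++ strip_indicator_prec_default p.2
    else
      l :: strip_indicator_prec_default ls
termination_by xs => xs.length
decreasing_by
  · exact pvTakeBlock_snd_lt l ls 0
  · simp

-- ===== PORT B =====

-- one iteration of B's single streaming loop;
-- state = (out, in_ind, ind_depth, in_lim, lim_depth)
def pvAltStep (st : List String × Bool × Int × Bool × Int) (line : String) :
    List String × Bool × Int × Bool × Int :=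
  let stripped := PySem.Str.strip line
  let br := (PySem.Str.count line "{" : Int) - (PySem.Str.count line "}" : Int)
  if st.2.1 = false then
    if PySem.Str.startswith stripped "indicator" = true then
      (st.1 ++ [line], decide (0 < br), br, false, 0)
    else
      (st.1 ++ [line], false, st.2.2.1, st.2.2.2.1, st.2.2.2.2)
  else
    let q : List String × Bool × Int :=
      if (!st.2.2.2.1 && PySem.Str.startswith stripped "limits") = true then
        (st.1 ++ [line], decide (0 < br), br)
      else if st.2.2.2.1 = true then
        let a := if stripped ≠ "precDefault=1" then st.1 ++ [line] else st.1
        let ld := st.2.2.2.2 + br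
        (a, decide (0 < ld), ld)
      else
        (st.1 ++ [line], st.2.2.2.1, st.2.2.2.2)
    let d := st.2.2.1 + br
    (q.1, decide (0 < d), d, q.2.1, q.2.2)

def strip_indicator_prec_default_alt (lines : List String) : List String :=
  (lines.foldl pvAltStep ([], false, 0, false, 0)).1

-- ===== PRECONDITION & SPEC =====
def Spec_strip_indicator_prec_default (lines : List String) (out : List String) : Prop := out = strip_indicator_prec_default_alt lines
instance (lines : List String) (out : List String) : Decidable (Spec_strip_indicator_prec_default lines out) := by unfold Spec_strip_indicator_prec_default; infer_instance

-- ===== CLAIM (what is proved, stated in full; the proofs are below) =====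
def Claim_equal_strip_indicator_prec_default : Prop := ∀ (lines : List String), Dom_strip_indicator_prec_default lines → Spec_strip_indicator_prec_default lines (strip_indicator_prec_default lines)

-- ===== LEMMAS AND PROOFS =====

-- a line whose strip starts with "indicator" cannot start with "limits"
theorem pvIndNotLim (s : String) (h : PySem.Str.startswith s "indicator" = true) :
    PySem.Str.startswith s "limits" = false := by
  rw [PySem.Str.startswith_eq] at h ⊢
  rw [PySem.Chars.startswith_iff] at h
  rcases h with ⟨t, ht⟩
  by_contra hc
  rw [Bool.not_eq_false, PySem.Chars.startswith_iff, ← ht] at hc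
  rcases hc with ⟨u, hu⟩
  have hl : "limits".toList = ['l','i','m','i','t','s'] := rfl
  have hi : "indicator".toList = ['i','n','d','i','c','a','t','o','r'] := rfl
  rw [hl, hi] at hu
  simp at hu

theorem pvStripStep_shift (r : List String) (i : Bool) (ld : Int) (line : String) :
    pvStripStep (r, i, ld) line
      = (r ++ (pvStripStep ([], i, ld) line).1, (pvStripStep ([], i, ld) line).2) := by
  simp only [pvStripStep]
  split_ifs <;> simp

theorem pvFoldlStrip_shift : ∀ (xs : List String) (r : List String) (i : Bool) (ld : Int),
    xs.foldl pvStripStep (r, i, ld)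
      = (r ++ (xs.foldl pvStripStep ([], i, ld)).1, (xs.foldl pvStripStep ([], i, ld)).2) := by
  intro xs
  induction xs with
  | nil => intro r i ld; simp
  | cons l xs ih =>
    intro r i ld
    simp only [List.foldl_cons]
    rw [pvStripStep_shift r i ld l]
    rcases hE : pvStripStep ([], i, ld) l with ⟨e, i', ld'⟩
    rw [ih (r ++ e) i' ld', ih e i' ld', List.append_assoc]

-- inside an indicator block, one B step is A's limits step plus the indicator depth update
theorem pvAlt_inside (acc : List String) (d : Int) (iL : Bool) (lD : Int) (line : String) :
    pvAltStep (acc, true, d, iL, lD) line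
      = ((pvStripStep (acc, iL, lD) line).1, decide (0 < d + pvBraces line),
          d + pvBraces line, (pvStripStep (acc, iL, lD) line).2.1, (pvStripStep (acc, iL, lD) line).2.2) := by
  simp only [pvAltStep, pvStripStep, pvBraces]
  split_ifs <;> simp_all

-- the simultaneous invariant: B's fold, outside resp. inside an indicator block, tracks A
theorem pvMain : ∀ xs : List String,
    (∀ (acc : List String) (indD : Int) (iL : Bool) (lD : Int),
        (xs.foldl pvAltStep (acc, false, indD, iL, lD)).1
          = acc ++ strip_indicator_prec_default xs)
    ∧ (∀ (acc : List String) (d : Int) (iL : Bool) (lD : Int),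
        (xs.foldl pvAltStep (acc, true, d, iL, lD)).1
          = acc ++ ((pvTakeBlock xs d).1.foldl pvStripStep ([], iL, lD)).1
              ++ strip_indicator_prec_default (pvTakeBlock xs d).2) := by
  intro xs
  induction xs with
  | nil =>
    constructor
    · intro acc indD iL lD; simp [strip_indicator_prec_default]
    · intro acc d iL lD; simp [strip_indicator_prec_default, pvTakeBlock]
  | cons l ls ih =>
    constructor
    · intro acc indD iL lD
      simp only [List.foldl_cons]
      by_cases hind : PySem.Str.startswith (PySem.Str.strip l) "indicator" = true
      · have hindC := hind
        simp at hindC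
        have hlim := pvIndNotLim _ hind
        simp at hlim
        have hstep : pvAltStep (acc, false, indD, iL, lD) l
            = (acc ++ [l], decide (0 < pvBraces l), pvBraces l, false, 0) := by
          simp [pvAltStep, pvBraces, hindC]
        rw [hstep]
        have hfirst : pvStripStep ([], false, 0) l = ([l], false, 0) := by
          simp [pvStripStep, hlim]
        by_cases hbr : 0 < pvBraces l
        · simp only [hbr, decide_true]
          rw [(ih.2) (acc ++ [l]) (pvBraces l) false 0]
          rw [strip_indicator_prec_default]
          simp only [hind, if_true]
          have htb : pvTakeBlock (l :: ls) 0
              = (l :: (pvTakeBlock ls (pvBraces l)).1, (pvTakeBlock ls (pvBraces l)).2) := by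
            simp only [pvTakeBlock, Int.zero_add]
            rw [if_neg (by omega)]
          rw [htb]
          simp only [pvStripIndLimits, List.foldl_cons, hfirst]
          rw [pvFoldlStrip_shift _ [l] false 0]
          simp [List.append_assoc]
        · simp only [hbr, decide_false]
          rw [(ih.1) (acc ++ [l]) (pvBraces l) false 0]
          rw [strip_indicator_prec_default]
          simp only [hind, if_true]
          have htb : pvTakeBlock (l :: ls) 0 = ([l], ls) := by
            simp only [pvTakeBlock, Int.zero_add]
            rw [if_pos (by omega)]
          rw [htb]
          simp only [pvStripIndLimits, List.foldl_cons, List.foldl_nil, hfirst]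
          simp [List.append_assoc]
      · have hindC : PySem.Chars.startswith (PySem.Chars.strip l.toList) ['i','n','d','i','c','a','t','o','r'] = false := by
          have := hind
          simpa using this
        have hstep : pvAltStep (acc, false, indD, iL, lD) l
            = (acc ++ [l], false, indD, iL, lD) := by
          simp [pvAltStep, hindC]
        rw [hstep, (ih.1) (acc ++ [l]) indD iL lD]
        rw [strip_indicator_prec_default]
        simp [hindC, List.append_assoc]
    · intro acc d iL lD
      simp only [List.foldl_cons]
      rw [pvAlt_inside]
      rcases hS : pvStripStep (acc, iL, lD) l with ⟨a', i', ld'⟩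
      have hsh := pvStripStep_shift acc iL lD l
      rw [hS] at hsh
      rcases hE : pvStripStep ([], iL, lD) l with ⟨e, ie, lde⟩
      rw [hE] at hsh
      have ha' : a' = acc ++ e := by simpa using congrArg Prod.fst hsh
      have hie : i' = ie ∧ ld' = lde := by
        have := congrArg Prod.snd hsh; simp at this; exact ⟨this.1, this.2⟩
      by_cases hd : 0 < d + pvBraces l
      · simp only [hd, decide_true]
        rw [(ih.2) a' (d + pvBraces l) i' ld']
        have htb : pvTakeBlock (l :: ls) d
            = (l :: (pvTakeBlock ls (d + pvBraces l)).1, (pvTakeBlock ls (d + pvBraces l)).2) := by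
          simp only [pvTakeBlock]
          rw [if_neg (by omega)]
        rw [htb]
        simp only [List.foldl_cons, hE]
        rw [pvFoldlStrip_shift _ e ie lde]
        rw [ha', hie.1, hie.2]
        simp [List.append_assoc]
      · simp only [hd, decide_false]
        rw [(ih.1) a' (d + pvBraces l) i' ld']
        have htb : pvTakeBlock (l :: ls) d = ([l], ls) := by
          simp only [pvTakeBlock]
          rw [if_pos (by omega)]
        rw [htb]
        simp only [List.foldl_cons, List.foldl_nil, hE]
        simp [ha', List.append_assoc]

-- ===== VERDICT (by name: the statement is the Claim_ definition above) =====
theorem strip_indicator_prec_default_spec : Claim_equal_strip_indicator_prec_default := by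
  intro lines _
  unfold Spec_strip_indicator_prec_default strip_indicator_prec_default_alt
  rw [(pvMain lines).1 [] 0 false 0]
  simp
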